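-- pv_equiv track=rewrite | github.com/UMD-Summer-2021-ASR/quizzr-server | rec_processing.py | categorize_submissions
-- ===== SOURCE A (Python) =====
-- from typing import List, Dict, Union
--
-- def categorize_submissions(submissions: List[str], sub2meta: Dict[str, dict]):
--     """
--     Divide the submissions by the recording type.
--
--     :param submissions: The submission names
--     :param sub2meta: A dictionary mapping submission names to metadata, which must contain a "recType" key
--     :return: A dictionary mapping submission types to lists of submission names
--     """
--     typed_submissions = {}
--     for submission in submissions:
--         submission_type = sub2meta[submission]["recType"]
--         if submission_type not in typed_submissions:
--             typed_submissions[submission_type] = []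
--         typed_submissions[submission_type].append(submission)
--     return typed_submissions
-- ===== SOURCE B (Python) =====
-- def categorize_submissions(submissions, sub2meta):
--     typed_submissions = {}
--     pending = list(submissions)
--     while pending:
--         t = sub2meta[pending[0]]["recType"]
--         typed_submissions[t] = [s for s in pending if sub2meta[s]["recType"] == t]
--         pending = [s for s in pending if sub2meta[s]["recType"] != t]
--     return typed_submissions
-- ===== Notes on version B (the rewrite author's own statement) =====
-- stated objective: alternative
-- what changed: A buckets each submission into a dict of mutable per-type lists in one pass; B repeatedly partitions the remaining submissions around the first one's recType, emitting one complete group per round (quicksort-style partition loop, no per-element bucket updates).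
import Mathlib
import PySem

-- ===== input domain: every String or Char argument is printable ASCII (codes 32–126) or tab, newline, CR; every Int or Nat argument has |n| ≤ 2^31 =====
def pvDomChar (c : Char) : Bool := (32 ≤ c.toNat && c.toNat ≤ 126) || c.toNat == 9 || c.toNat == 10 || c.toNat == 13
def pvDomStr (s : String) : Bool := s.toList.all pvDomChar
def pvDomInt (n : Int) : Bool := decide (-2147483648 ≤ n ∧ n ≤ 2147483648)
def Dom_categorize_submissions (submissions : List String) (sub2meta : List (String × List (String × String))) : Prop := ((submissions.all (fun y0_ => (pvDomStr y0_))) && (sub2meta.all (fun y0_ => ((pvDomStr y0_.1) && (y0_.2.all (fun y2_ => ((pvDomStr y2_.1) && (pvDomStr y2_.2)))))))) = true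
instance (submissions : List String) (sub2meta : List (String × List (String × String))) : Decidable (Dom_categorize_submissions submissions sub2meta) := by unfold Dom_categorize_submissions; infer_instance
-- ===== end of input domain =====

-- One line: B replaces A's single-pass per-element dict bucketing with a partition loop that peels off one whole recType group per round; same return value, objective: alternative decomposition.

-- ===== PORT A =====
-- sub2meta[s]["recType"]; the "" default is only reachable outside Pre_ (where Python raises KeyError)
def pvSubType (sub2meta : List (String × List (String × String))) (s : String) : String :=
  ((((sub2meta.lookup s).getD []).lookup "recType").getD "")

def categorize_submissions (submissions : List String) (sub2meta : List (String × List (String × String))) : List (String × List String) :=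
  (submissions.foldl (fun d s =>
      let t := pvSubType sub2meta s
      let d' := if d.contains t then d else d.insert t ([] : List String)
      d'.modify t [] (fun l => l ++ [s]))
    PySem.Dict.empty).items

-- ===== PORT B =====
-- B's while loop over `pending`; each round assigns the full group of the first pending submission's recType and drops it from `pending`
def pvPartitionLoop (sub2meta : List (String × List (String × String))) (pending : List String)
    (typed : PySem.Dict String (List String)) : PySem.Dict String (List String) :=
  match pending with
  | [] => typed
  | s :: rest0 =>
    let t := ((((sub2meta.lookup s).getD []).lookup "recType").getD "")
    let grp := (s :: rest0).filter (fun x => ((((sub2meta.lookup x).getD []).lookup "recType").getD "") == t)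
    let rest := (s :: rest0).filter (fun x => !(((((sub2meta.lookup x).getD []).lookup "recType").getD "") == t))
    pvPartitionLoop sub2meta rest (typed.insert t grp)
termination_by pending.length
decreasing_by
  simp only [List.filter_cons, beq_self_eq_true, Bool.not_true, Bool.false_eq_true, if_false]
  exact Nat.lt_succ_of_le (List.length_filter_le _ _)

def categorize_submissions_alt (submissions : List String) (sub2meta : List (String × List (String × String))) : List (String × List String) :=
  (pvPartitionLoop sub2meta submissions PySem.Dict.empty).items

-- ===== PRECONDITION & SPEC =====
-- Pre_ excludes exactly the inputs where A raises KeyError: a submission missing from sub2meta, or a metadata entry without a "recType" key.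
def Pre_categorize_submissions (submissions : List String) (sub2meta : List (String × List (String × String))) : Prop :=
  ∀ s ∈ submissions, (((sub2meta.lookup s).getD []).lookup "recType").isSome = true
instance (submissions : List String) (sub2meta : List (String × List (String × String))) : Decidable (Pre_categorize_submissions submissions sub2meta) := by unfold Pre_categorize_submissions; infer_instance

def pvWitness_categorize_submissions : List String × (List (String × List (String × String))) :=
  (["a", "b", "a"], [("a", [("recType", "x")]), ("b", [("recType", "y")])])

def Spec_categorize_submissions (submissions : List String) (sub2meta : List (String × List (String × String))) (out : List (String × List String)) : Prop := out = categorize_submissions_alt submissions sub2meta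
instance (submissions : List String) (sub2meta : List (String × List (String × String))) (out : List (String × List String)) : Decidable (Spec_categorize_submissions submissions sub2meta out) := by unfold Spec_categorize_submissions; infer_instance

-- ===== CLAIM (what is proved, stated in full; the proofs are below) =====
def Claim_equal_categorize_submissions : Prop := ∀ (submissions : List String) (sub2meta : List (String × List (String × String))), Dom_categorize_submissions submissions sub2meta → Pre_categorize_submissions submissions sub2meta → Spec_categorize_submissions submissions sub2meta (categorize_submissions submissions sub2meta)

-- ===== LEMMAS AND PROOFS =====

-- the common value both algorithms compute: groups keyed by distinct recTypes in first-appearance order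
def pvGroups (sub2meta : List (String × List (String × String))) (subs : List String) : List (String × List String) :=
  (PySem.List.dedup (subs.map (pvSubType sub2meta))).map
    (fun t => (t, subs.filter (fun s => pvSubType sub2meta s == t)))

-- A's loop step (setdefault-then-append) is the modify step
theorem pv_stepA_eq (d : PySem.Dict String (List String)) (t s : String) :
    (if d.contains t then d else d.insert t ([] : List String)).modify t [] (fun l => l ++ [s])
      = d.modify t [] (fun l => l ++ [s]) := by
  by_cases h : d.contains t = true
  · simp [h]
  · have h' : d.contains t = false := by simpa using h
    simp only [h', Bool.false_eq_true, if_false]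
    simp only [PySem.Dict.modify, PySem.Dict.getD_insert_self,
      PySem.Dict.getD_of_not_contains _ _ h', PySem.Dict.insert_insert_self]

-- a dict with nodup keys is determined by its keys and getD
theorem pv_items_eq_keys_map {κ ν : Type} [BEq κ] [LawfulBEq κ]
    (d : PySem.Dict κ ν) (d0 : ν) (h : d.keys.Nodup) :
    d.items = d.keys.map (fun k => (k, d.getD k d0)) := by
  have : d.keys = d.items.map (·.1) := rfl
  rw [this, List.map_map]
  conv_lhs => rw [← List.map_id d.items]
  apply List.map_congr_left
  intro p hp
  have := PySem.Dict.getD_of_mem_items d (k := p.1) (v := p.2) (by simpa using hp) h d0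
  simp [Function.comp, this]

-- A's fold equals the common group value
theorem pv_A_eq_groups (submissions : List String) (sub2meta : List (String × List (String × String))) :
    categorize_submissions submissions sub2meta = pvGroups sub2meta submissions := by
  unfold categorize_submissions pvGroups
  set key := pvSubType sub2meta with hk
  have hfold :
      (submissions.foldl (fun d s =>
        let t := key s
        let d' := if d.contains t then d else d.insert t ([] : List String)
        d'.modify t [] (fun l => l ++ [s])) PySem.Dict.empty)
      = submissions.foldl (fun d s => d.modify (key s) [] (fun l => l ++ [s])) PySem.Dict.empty := by
    have hsf : (fun (d : PySem.Dict String (List String)) (s : String) =>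
        let t := key s
        let d' := if d.contains t then d else d.insert t ([] : List String)
        d'.modify t [] (fun l => l ++ [s]))
        = fun d s => d.modify (key s) [] (fun l => l ++ [s]) := by
      funext d s
      exact pv_stepA_eq d (key s) s
    rw [hsf]
  rw [hfold]
  set D := submissions.foldl (fun d s => d.modify (key s) [] (fun l => l ++ [s])) PySem.Dict.empty with hD
  have hkeys : D.keys = PySem.List.dedup (submissions.map key) := by
    rw [hD, PySem.Dict.keys_foldl_modify_key submissions key ([] : List String)
      (fun _ s => fun l => l ++ [s]) PySem.Dict.empty]
    simp [PySem.List.dedup_eq_ofList, PySem.Set.update, PySem.Set.ofList, PySem.Dict.keys_empty,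
      PySem.Set.empty]
  have hnodup : D.keys.Nodup := by rw [hkeys]; exact PySem.List.nodup_dedup _
  have hgetD : ∀ c, D.getD c [] = submissions.filter (fun s => key s == c) := by
    intro c
    have hmap : D = (submissions.map (fun s => (key s, s))).foldl
        (fun d p => d.modify p.1 [] (fun l => l ++ [p.2])) PySem.Dict.empty := by
      rw [hD, List.foldl_map]
    rw [hmap, PySem.Dict.getD_foldl_modify_append]
    rw [List.filter_map]
    simp [Function.comp_def]
  rw [pv_items_eq_keys_map D ([] : List String) hnodup, hkeys]
  apply List.map_congr_left
  intro t _
  rw [hgetD]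

-- dedup peels its head together with all its later duplicates
theorem pv_dedup_cons (t : String) (l : List String) :
    PySem.List.dedup (t :: l) = t :: (PySem.List.dedup l).filter (fun y => !(y == t)) := by
  simp only [PySem.List.dedup_eq_ofList, PySem.Set.ofList_cons]
  rfl

-- filtering commutes with dedup
theorem pv_filter_dedup (p : String → Bool) (l : List String) :
    (PySem.List.dedup l).filter p = PySem.List.dedup (l.filter p) := by
  induction l with
  | nil => rfl
  | cons x l ih =>
    rw [pv_dedup_cons, List.filter_cons, List.filter_cons]
    by_cases hx : p x = true
    · rw [if_pos hx, if_pos hx, pv_dedup_cons, ← ih,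
        List.filter_filter, List.filter_filter]
      congr 1
      exact List.filter_congr (fun y _ => by cases h : p y <;> simp [Bool.and_comm])
    · have hx' : p x = false := by simpa using hx
      rw [if_neg hx, if_neg hx, List.filter_filter, ← ih]
      apply List.filter_congr
      intro y _
      cases h : p y with
      | false => simp
      | true =>
        have hyx : (y == x) = false := by
          cases hyx : y == x with
          | false => rfl
          | true => exact absurd h (by rw [eq_of_beq hyx, hx']; simp)
        simp [hyx]

-- pvGroups satisfies B's partition recursion
theorem pv_groups_cons (sub2meta : List (String × List (String × String))) (s : String) (rest : List String) :
    pvGroups sub2meta (s :: rest)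
      = (pvSubType sub2meta s,
          (s :: rest).filter (fun x => pvSubType sub2meta x == pvSubType sub2meta s))
        :: pvGroups sub2meta ((s :: rest).filter (fun x => !(pvSubType sub2meta x == pvSubType sub2meta s))) := by
  unfold pvGroups
  set key := pvSubType sub2meta with hk
  set t := key s with ht
  have hmapfil : ((s :: rest).filter (fun x => !(key x == t))).map key
      = ((s :: rest).map key).filter (fun y => !(y == t)) := by
    rw [List.filter_map]
    rfl
  rw [hmapfil]
  have hhead : ((s :: rest).map key).filter (fun y => !(y == t))
      = (rest.map key).filter (fun y => !(y == t)) := by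
    simp [← ht]
  rw [hhead, ← pv_filter_dedup, List.map_cons, ← ht, pv_dedup_cons, List.map_cons]
  congr 1
  -- remaining: inner filters over the partitioned list agree for each u ≠ t
  have hff : ∀ u, (u == t) = false →
      ((s :: rest).filter (fun x => !(key x == t))).filter (fun x => key x == u)
        = (s :: rest).filter (fun x => key x == u) := by
    intro u hu
    rw [List.filter_filter]
    apply List.filter_congr
    intro x _
    cases h : key x == u with
    | false => simp
    | true =>
      have : (key x == t) = false := by
        rw [eq_of_beq h]
        exact hu
      simp [this]
  apply List.map_congr_left
  intro u hu
  have hut : (u == t) = false := by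
    have hmem : u ∈ (rest.map key).filter (fun y => !(y == t)) := by simpa [PySem.List.dedup_eq_ofList, PySem.Set.mem_ofList] using hu
    have := List.of_mem_filter hmem
    simpa using this
  rw [hff u hut]

-- B's loop appends the remaining groups onto any dict whose keys avoid the pending recTypes
theorem pv_loop_eq_groups (sub2meta : List (String × List (String × String))) :
    ∀ (n : Nat) (pending : List String), pending.length ≤ n →
    ∀ (typed : PySem.Dict String (List String)),
      (∀ s ∈ pending, typed.contains (pvSubType sub2meta s) = false) →
      (pvPartitionLoop sub2meta pending typed).items = typed.items ++ pvGroups sub2meta pending := by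
  intro n
  induction n with
  | zero =>
    intro pending hlen typed _
    have hnil : pending = [] := List.eq_nil_of_length_eq_zero (Nat.le_zero.mp hlen)
    subst hnil
    rw [pvPartitionLoop.eq_def]
    simp [pvGroups, PySem.List.dedup_eq_ofList, PySem.Set.ofList]
  | succ n ih =>
    intro pending hlen typed hfresh
    match pending with
    | [] =>
      rw [pvPartitionLoop.eq_def]
      simp [pvGroups, PySem.List.dedup_eq_ofList, PySem.Set.ofList]
    | s :: rest0 =>
      rw [pvPartitionLoop]
      set key := pvSubType sub2meta with hk
      set t := ((((sub2meta.lookup s).getD []).lookup "recType").getD "") with ht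
      have htk : t = key s := rfl
      set grp := (s :: rest0).filter (fun x => ((((sub2meta.lookup x).getD []).lookup "recType").getD "") == t) with hgrp
      set rest := (s :: rest0).filter (fun x => !(((((sub2meta.lookup x).getD []).lookup "recType").getD "") == t)) with hrest
      have hgrp' : grp = (s :: rest0).filter (fun x => key x == t) := rfl
      have hrest' : rest = (s :: rest0).filter (fun x => !(key x == t)) := rfl
      have hrestlen : rest.length ≤ n := by
        have : rest = rest0.filter (fun x => !(key x == t)) := by
          rw [hrest']
          simp [htk]
        rw [this]
        exact le_trans (List.length_filter_le _ _) (Nat.le_of_succ_le_succ hlen)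
      have hfresh' : ∀ x ∈ rest, (typed.insert t grp).contains (key x) = false := by
        intro x hx
        have hxmem : x ∈ (s :: rest0) := List.mem_of_mem_filter (hrest' ▸ hx)
        have hxt : (key x == t) = false := by
          have := List.of_mem_filter (hrest' ▸ hx)
          simpa using this
        rw [PySem.Dict.contains_insert, hxt, Bool.false_or]
        exact hfresh x hxmem
      rw [ih rest hrestlen (typed.insert t grp) hfresh']
      have hnc : typed.contains t = false := by
        rw [htk]
        exact hfresh s (List.mem_cons_self)
      rw [PySem.Dict.items_insert_of_not_contains _ _ hnc, List.append_assoc]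
      congr 1
      rw [htk] at hgrp' hrest' ⊢
      rw [hgrp', hrest', List.singleton_append, ← pv_groups_cons]

-- B equals the common group value
theorem pv_B_eq_groups (submissions : List String) (sub2meta : List (String × List (String × String))) :
    categorize_submissions_alt submissions sub2meta = pvGroups sub2meta submissions := by
  unfold categorize_submissions_alt
  rw [pv_loop_eq_groups sub2meta submissions.length submissions le_rfl PySem.Dict.empty
    (fun s _ => PySem.Dict.contains_empty _)]
  rfl

-- ===== VERDICT (by name: the statement is the Claim_ definition above) =====
theorem categorize_submissions_spec : Claim_equal_categorize_submissions := by
  intro submissions sub2meta _ _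
  unfold Spec_categorize_submissions
  rw [pv_A_eq_groups, pv_B_eq_groups]
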